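-- pv_equiv track=rewrite | github.com/jhriverasa/google-kickstart-solutions | Kickstart-2013/Round A 2013/read-phone-number.py | readnDigits
-- ===== SOURCE A (Python) =====
-- numbersName={'1':"one",'2':"two",'3':"three",'4':"four",'5':"five",'6':"six",'7':"seven",'8':"eight",'9':"nine",'0':"zero"}
--
-- consecutiveNames = ["double", "triple", "quadruple", "quintuple", "sextuple", "septuple", "octuple", "nonuple", "decuple"] #-2
--
-- def getnumOcurrences(partialStr: str, index: int):
--   maxIndex= len(partialStr)-1
--   counter=1
--   while( index + 1 <= maxIndex and partialStr[index] == partialStr[index+1] ):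
--     index+=1
--     counter+=1
--   return counter # ocurrences
--
-- def readnDigits(partialStr: str, n: int):
--   readList = []
--   index= 0
--   while(index < n):
--     num= partialStr[index]
--     numOcurrences = getnumOcurrences(partialStr=partialStr, index=index)
--     if(numOcurrences==1):
--       readList.append(numbersName.get(num))
--     elif( numOcurrences <= 10 ):
--       readList.append(consecutiveNames[numOcurrences-2])
--       readList.append(numbersName.get(num))
--     else:
--       for j in range(numOcurrences):
--         readList.append(numbersName.get(num))
--     index+=numOcurrences
--   return readList
-- ===== SOURCE B (Python) =====
-- numbersName={'1':"one",'2':"two",'3':"three",'4':"four",'5':"five",'6':"six",'7':"seven",'8':"eight",'9':"nine",'0':"zero"}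
--
-- consecutiveNames = ["double", "triple", "quadruple", "quintuple", "sextuple", "septuple", "octuple", "nonuple", "decuple"] #-2
--
-- def readnDigits(partialStr: str, n: int):
--   # phase 1: run-length encode the whole string in one pass
--   runs = []
--   for ch in partialStr:
--     if runs and runs[-1][0] == ch:
--       runs[-1] = (ch, runs[-1][1] + 1)
--     else:
--       runs.append((ch, 1))
--   # phase 2: spell out every run whose start position is < n
--   out = []
--   index = 0
--   for ch, count in runs:
--     if index >= n:
--       break
--     if count == 1:
--       out.append(numbersName.get(ch))
--     elif count <= 10:
--       out.append(consecutiveNames[count - 2])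
--       out.append(numbersName.get(ch))
--     else:
--       out.extend([numbersName.get(ch)] * count)
--     index += count
--   return out
-- ===== Notes on version B (the rewrite author's own statement) =====
-- stated objective: alternative
-- what changed: B separates the work into two passes: a single forward scan builds the run-length encoding of the whole string, then a second pass spells out each (char,count) run whose start position is below n, instead of A's index-walk that calls a helper to re-count the repetitions from each position.
-- outside the precondition, e.g. on readnDigits('ab', 2): A returns [None, None], B returns [None, None]; on readnDigits('12', 5): A raises IndexError, B returns ['one', 'two']
import Mathlib
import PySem

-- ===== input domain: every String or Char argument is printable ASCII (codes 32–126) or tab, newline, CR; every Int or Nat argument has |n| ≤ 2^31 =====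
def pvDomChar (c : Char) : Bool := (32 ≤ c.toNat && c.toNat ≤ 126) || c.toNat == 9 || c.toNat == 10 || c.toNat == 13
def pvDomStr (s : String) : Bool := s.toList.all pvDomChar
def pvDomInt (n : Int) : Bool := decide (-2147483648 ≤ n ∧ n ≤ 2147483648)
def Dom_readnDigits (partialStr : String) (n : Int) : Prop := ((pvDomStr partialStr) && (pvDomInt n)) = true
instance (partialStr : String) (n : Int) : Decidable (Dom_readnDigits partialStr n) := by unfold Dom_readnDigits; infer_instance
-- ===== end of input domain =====

-- B replaces A's index-walk (which re-scans forward from each position to count repetitions)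
-- by two passes: run-length encode the whole string, then spell out the runs starting before n.

-- ===== PORT A =====
def numbersName : PySem.Dict Char String :=
  PySem.Dict.ofList [('1',"one"),('2',"two"),('3',"three"),('4',"four"),('5',"five"),
                     ('6',"six"),('7',"seven"),('8',"eight"),('9',"nine"),('0',"zero")]

def consecutiveNames : List String :=
  ["double","triple","quadruple","quintuple","sextuple","septuple","octuple","nonuple","decuple"]

-- the while loop of getnumOcurrences (both indexings are in range: the loop guard ensures it);
-- fuel only makes the recursion structural: cs.length steps always suffice (the loop stays in range)
def occLoop (cs : List Char) (index counter fuel : Nat) : Nat :=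
  match fuel with
  | 0 => counter
  | f + 1 =>
    if index + 1 ≤ cs.length - 1 ∧ cs.getD index ' ' = cs.getD (index + 1) ' ' then
      occLoop cs (index + 1) (counter + 1) f
    else counter

def getnumOcurrences (cs : List Char) (index : Nat) : Nat := occLoop cs index 1 cs.length

-- the main while loop of readnDigits; partialStr[index] is in range on Pre_ inputs, and the fuel
-- n.toNat only makes the recursion structural (index grows by ≥ 1 per iteration, the loop runs while index < n)
def loopA (cs : List Char) (n : Int) (index : Nat) (acc : List String) (fuel : Nat) : List String :=
  match fuel with
  | 0 => acc
  | f + 1 =>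
    if (index : Int) < n then
      let num := cs.getD index ' '
      let occ := getnumOcurrences cs index
      let acc' :=
        if occ = 1 then acc ++ [numbersName.getD num ""]
        else if occ ≤ 10 then (acc ++ [consecutiveNames.getD (occ - 2) ""]) ++ [numbersName.getD num ""]
        else (List.range occ).foldl (fun a _ => a ++ [numbersName.getD num ""]) acc
      loopA cs n (index + occ) acc' f
    else acc

def readnDigits (partialStr : String) (n : Int) : List String :=
  loopA partialStr.toList n 0 [] n.toNat

-- ===== PORT B =====
-- phase 1 of Source B: one step of the scan (extend the last run or start a new one)
def rleStep (runs : List (Char × Nat)) (ch : Char) : List (Char × Nat) :=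
  match runs.getLast? with
  | some (c, k) => if c = ch then runs.dropLast ++ [(c, k + 1)] else runs ++ [(ch, 1)]
  | none => [(ch, 1)]

def rle (cs : List Char) : List (Char × Nat) := cs.foldl rleStep []

-- phase 2 of Source B: spell out every run whose start position is < n
def emitRuns (runs : List (Char × Nat)) (n : Int) (index : Nat) (out : List String) : List String :=
  match runs with
  | [] => out
  | (ch, count) :: rest =>
    if n ≤ (index : Int) then out
    else
      let out' :=
        if count = 1 then out ++ [numbersName.getD ch ""]
        else if count ≤ 10 then out ++ [consecutiveNames.getD (count - 2) "", numbersName.getD ch ""]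
        else out ++ List.replicate count (numbersName.getD ch "")
      emitRuns rest n (index + count) out'

def readnDigits_alt (partialStr : String) (n : Int) : List String :=
  emitRuns (rle partialStr.toList) n 0 []

-- ===== PRECONDITION & SPEC =====
-- Pre_ excludes the inputs where Python A raises IndexError (n > len(partialStr)) and the inputs
-- with a non-digit among the first n characters, on which A returns a list containing None
-- (numbersName.get misses), not a value of the declared type list[str]; B behaves the same there.
def Pre_readnDigits (partialStr : String) (n : Int) : Prop :=
  n ≤ (partialStr.toList.length : Int) ∧
    (partialStr.toList.take n.toNat).all PySem.Chars.isdigit = true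

instance (partialStr : String) (n : Int) : Decidable (Pre_readnDigits partialStr n) := by
  unfold Pre_readnDigits; infer_instance

def pvWitness_readnDigits : String × Int := ("1", 1)

def Spec_readnDigits (partialStr : String) (n : Int) (out : List String) : Prop :=
  out = readnDigits_alt partialStr n

instance (partialStr : String) (n : Int) (out : List String) : Decidable (Spec_readnDigits partialStr n out) := by
  unfold Spec_readnDigits; infer_instance

-- ===== CLAIM (what is proved, stated in full; the proofs are below) =====
def Claim_equal_readnDigits : Prop :=
  ∀ (partialStr : String) (n : Int), Dom_readnDigits partialStr n →
    Pre_readnDigits partialStr n → Spec_readnDigits partialStr n (readnDigits partialStr n)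

-- ===== LEMMAS AND PROOFS =====
-- the string a run list denotes
def decodeRuns (runs : List (Char × Nat)) : List Char :=
  runs.flatMap (fun r => List.replicate r.2 r.1)

theorem decodeRuns_append (xs ys : List (Char × Nat)) :
    decodeRuns (xs ++ ys) = decodeRuns xs ++ decodeRuns ys := by
  simp [decodeRuns]

-- the single invariant of Source B's first pass: the runs spell the scanned prefix,
-- every count is ≥ 1 and adjacent runs carry different characters
theorem rle_inv (cs : List Char) :
    decodeRuns (rle cs) = cs ∧ (∀ r ∈ rle cs, 1 ≤ r.2) ∧
      (rle cs).IsChain (fun a b => a.1 ≠ b.1) := by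
  induction cs using List.reverseRecOn with
  | nil => exact ⟨rfl, by simp [rle], List.IsChain.nil⟩
  | append_singleton cs c ih =>
    obtain ⟨hdec, hpos, hchain⟩ := ih
    have hstep : rle (cs ++ [c]) = rleStep (rle cs) c := by
      simp [rle, List.foldl_append]
    rw [hstep]
    match h : (rle cs).getLast? with
    | none =>
      have hemp : rle cs = [] := List.getLast?_eq_none_iff.mp h
      have hcs : cs = [] := by rw [← hdec, hemp]; rfl
      simp only [rleStep, h]
      refine ⟨?_, by simp, List.IsChain.singleton _⟩
      simp [decodeRuns, hcs]
    | some (c0, k) =>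
      have hne : rle cs ≠ [] := by
        intro he; rw [he] at h; simp at h
      have hsplit : (rle cs).dropLast ++ [(c0, k)] = rle cs := by
        have h1 := List.dropLast_concat_getLast hne
        have h2 := List.getLast?_eq_some_getLast hne
        rw [h, Option.some.injEq] at h2
        rw [← h2] at h1
        exact h1
      simp only [rleStep, h]
      by_cases hc : c0 = c
      · rw [if_pos hc]
        subst hc
        refine ⟨?_, ?_, ?_⟩
        · have e1 : decodeRuns ((rle cs).dropLast ++ [(c0, k + 1)])
              = decodeRuns ((rle cs).dropLast ++ [(c0, k)]) ++ [c0] := by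
            rw [decodeRuns_append, decodeRuns_append]
            simp [decodeRuns, List.replicate_succ']
          rw [e1, hsplit, hdec]
        · intro r hr
          rcases List.mem_append.mp hr with h1 | h2
          · exact hpos r (by rw [← hsplit]; exact List.mem_append_left _ h1)
          · simp at h2; simp [h2]
        · have hmap : ((rle cs).dropLast ++ [(c0, k + 1)]).map Prod.fst
              = (rle cs).map Prod.fst := by
            rw [← hsplit]; simp
          have h1 : (((rle cs).map Prod.fst).IsChain (· ≠ ·)) :=
            (List.isChain_map Prod.fst).mpr hchain
          have h2 : ((((rle cs).dropLast ++ [(c0, k + 1)]).map Prod.fst).IsChain (· ≠ ·)) := by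
            rw [hmap]; exact h1
          exact (List.isChain_map Prod.fst).mp h2
      · rw [if_neg hc]
        refine ⟨?_, ?_, ?_⟩
        · rw [decodeRuns_append, hdec]; simp [decodeRuns]
        · intro r hr
          rcases List.mem_append.mp hr with h1 | h2
          · exact hpos r h1
          · simp at h2; simp [h2]
        · rw [List.isChain_append]
          refine ⟨hchain, List.IsChain.singleton _, ?_⟩
          intro x hx y hy
          rw [h, Option.mem_def, Option.some.injEq] at hx
          simp at hy
          subst hx; subst hy
          simpa using hc

theorem decode_rle (cs : List Char) : decodeRuns (rle cs) = cs := (rle_inv cs).1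

theorem rle_pos (cs : List Char) : ∀ r ∈ rle cs, 1 ≤ r.2 := (rle_inv cs).2.1

theorem rle_chain (cs : List Char) : (rle cs).IsChain (fun a b => a.1 ≠ b.1) :=
  (rle_inv cs).2.2

theorem getD_run (u v : List Char) (c : Char) (m t : Nat) (ht : t < m) :
    (u ++ (List.replicate m c ++ v)).getD (u.length + t) ' ' = c := by
  rw [List.getD_append_right u _ ' ' _ (by omega)]
  rw [Nat.add_sub_cancel_left]
  rw [List.getD_append _ v ' ' t (by simpa using ht)]
  exact List.getD_replicate c ht

theorem occLoop_run (c : Char) (k : Nat) : ∀ (u v : List Char) (ctr fuel : Nat),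
    k < fuel → (v = [] ∨ v.head? ≠ some c) →
    occLoop (u ++ (List.replicate (k + 1) c ++ v)) u.length ctr fuel = ctr + k := by
  induction k with
  | zero =>
    intro u v ctr fuel hf hv
    obtain ⟨f, rfl⟩ : ∃ f, fuel = f + 1 := ⟨fuel - 1, by omega⟩
    have hcond : ¬ (u.length + 1 ≤ (u ++ (List.replicate (0 + 1) c ++ v)).length - 1 ∧
        (u ++ (List.replicate (0 + 1) c ++ v)).getD u.length ' ' =
          (u ++ (List.replicate (0 + 1) c ++ v)).getD (u.length + 1) ' ') := by
      rintro ⟨hlen, heq⟩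
      cases v with
      | nil => simp at hlen
      | cons x v' =>
          have hx : x ≠ c := by
            rcases hv with h | h
            · simp at h
            · simpa using h
          have g0 : (u ++ (List.replicate (0 + 1) c ++ x :: v')).getD u.length ' ' = c := by
            have h0 := getD_run u (x :: v') c (0 + 1) 0 (by omega)
            rw [Nat.add_zero] at h0
            exact h0
          have g1 : (u ++ (List.replicate (0 + 1) c ++ x :: v')).getD (u.length + 1) ' ' = x := by
            rw [List.getD_append_right u _ ' ' _ (by omega), Nat.add_sub_cancel_left]
            simp
          rw [g0, g1] at heq
          exact hx heq.symm
    simp only [occLoop, if_neg hcond]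
    omega
  | succ k ih =>
    intro u v ctr fuel hf hv
    obtain ⟨f, rfl⟩ : ∃ f, fuel = f + 1 := ⟨fuel - 1, by omega⟩
    have hcond : (u.length + 1 ≤ (u ++ (List.replicate (k + 1 + 1) c ++ v)).length - 1 ∧
        (u ++ (List.replicate (k + 1 + 1) c ++ v)).getD u.length ' ' =
          (u ++ (List.replicate (k + 1 + 1) c ++ v)).getD (u.length + 1) ' ') := by
      constructor
      · simp; omega
      · have e0 := getD_run u v c (k + 1 + 1) 0 (by omega)
        have e1 := getD_run u v c (k + 1 + 1) 1 (by omega)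
        simp only [Nat.add_zero] at e0
        rw [e0, e1]
    simp only [occLoop, if_pos hcond]
    have heq : u ++ (List.replicate (k + 1 + 1) c ++ v)
        = (u ++ [c]) ++ (List.replicate (k + 1) c ++ v) := by
      simp [List.replicate_succ]
    rw [heq]
    have h2 := ih (u ++ [c]) v (ctr + 1) f (by omega) hv
    have hl : (u ++ [c]).length = u.length + 1 := by simp
    rw [hl] at h2
    rw [h2]
    omega

theorem emitRuns_cons (c : Char) (k : Nat) (rest : List (Char × Nat)) (n : Int) (index : Nat) (out : List String) :
    emitRuns ((c, k) :: rest) n index out =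
      if n ≤ (index : Int) then out
      else emitRuns rest n (index + k)
        (if k = 1 then out ++ [numbersName.getD c ""]
         else if k ≤ 10 then out ++ [consecutiveNames.getD (k - 2) "", numbersName.getD c ""]
         else out ++ List.replicate k (numbersName.getD c "")) := rfl

theorem foldl_range_const (m : Nat) (a : List String) (s : String) :
    (List.range m).foldl (fun a _ => a ++ [s]) a = a ++ List.replicate m s := by
  rw [PySem.List.foldl_append_singleton_eq_map (fun _ => s) (List.range m) a]
  simp [List.map_const']

theorem loopA_eq_emit (n : Int) : ∀ (runs : List (Char × Nat)) (u : List Char) (acc : List String) (fuel : Nat),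
    (∀ r ∈ runs, 1 ≤ r.2) → runs.IsChain (fun a b => a.1 ≠ b.1) →
    n ≤ ((u.length + (decodeRuns runs).length : Nat) : Int) →
    n ≤ (u.length : Int) + fuel →
    loopA (u ++ decodeRuns runs) n u.length acc fuel = emitRuns runs n u.length acc := by
  intro runs
  induction runs with
  | nil =>
    intro u acc fuel _ _ hn _
    have hle : ¬ ((u.length : Int) < n) := by simp [decodeRuns] at hn ⊢; omega
    cases fuel with
    | zero => rfl
    | succ f => simp only [loopA, if_neg hle]; rfl
  | cons r rest ih =>
    obtain ⟨c, k⟩ := r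
    intro u acc fuel hpos hchain hn hfuel
    by_cases hlt : (u.length : Int) < n
    · have hle : ¬ (n ≤ (u.length : Int)) := by omega
      obtain ⟨f, rfl⟩ : ∃ f, fuel = f + 1 := ⟨fuel - 1, by omega⟩
      have hk : 1 ≤ k := by simpa using hpos (c, k) (by simp)
      obtain ⟨k', rfl⟩ : ∃ k', k = k' + 1 := ⟨k - 1, by omega⟩
      have hdec : decodeRuns ((c, k' + 1) :: rest) = List.replicate (k' + 1) c ++ decodeRuns rest := by
        simp [decodeRuns]
      have hv : decodeRuns rest = [] ∨ (decodeRuns rest).head? ≠ some c := by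
        cases rest with
        | nil => left; rfl
        | cons r2 l2 =>
          right
          obtain ⟨c2, k2⟩ := r2
          have hk2 : 1 ≤ k2 := by simpa using hpos (c2, k2) (by simp)
          have hne : c ≠ c2 := by
            have := (List.isChain_cons_cons.mp hchain).1
            simpa using this
          obtain ⟨k2', rfl⟩ : ∃ j, k2 = j + 1 := ⟨k2 - 1, by omega⟩
          simp [decodeRuns, List.replicate_succ]
          exact fun h => hne h.symm
      have hocc : getnumOcurrences (u ++ decodeRuns ((c, k' + 1) :: rest)) u.length = k' + 1 := by
        unfold getnumOcurrences
        rw [hdec, occLoop_run c k' u (decodeRuns rest) 1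
          (u ++ (List.replicate (k' + 1) c ++ decodeRuns rest)).length (by simp; omega) hv]
        omega
      have hnum : (u ++ decodeRuns ((c, k' + 1) :: rest)).getD u.length ' ' = c := by
        rw [hdec]
        have h0 := getD_run u (decodeRuns rest) c (k' + 1) 0 (by omega)
        rw [Nat.add_zero] at h0
        exact h0
      have hlen2 : (decodeRuns ((c, k' + 1) :: rest)).length
          = (k' + 1) + (decodeRuns rest).length := by
        rw [hdec]; simp
      have step : ∀ out : List String,
          loopA (u ++ decodeRuns ((c, k' + 1) :: rest)) n (u.length + (k' + 1)) out f
            = emitRuns rest n (u.length + (k' + 1)) out := by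
        intro out
        have ih' := ih (u ++ List.replicate (k' + 1) c) out f
          (fun r hr => hpos r (by simp [hr]))
          (by
            cases rest with
            | nil => exact List.IsChain.nil
            | cons r2 l2 => exact (List.isChain_cons_cons.mp hchain).2)
          (by
            have h3 := hlen2
            simp only [List.length_append, List.length_replicate]
            push_cast at hn h3 ⊢
            omega)
          (by
            simp only [List.length_append, List.length_replicate]
            push_cast at hfuel ⊢
            omega)
        simp only [List.length_append, List.length_replicate] at ih'
        rw [hdec, ← List.append_assoc]
        exact ih'
      have hbranch :
          (if k' + 1 = 1 then acc ++ [numbersName.getD c ""]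
           else if k' + 1 ≤ 10 then (acc ++ [consecutiveNames.getD (k' + 1 - 2) ""]) ++ [numbersName.getD c ""]
           else (List.range (k' + 1)).foldl (fun a _ => a ++ [numbersName.getD c ""]) acc)
          = (if k' + 1 = 1 then acc ++ [numbersName.getD c ""]
             else if k' + 1 ≤ 10 then acc ++ [consecutiveNames.getD (k' + 1 - 2) "", numbersName.getD c ""]
             else acc ++ List.replicate (k' + 1) (numbersName.getD c "")) := by
        split_ifs with h1 h10
        · rfl
        · simp
        · exact foldl_range_const (k' + 1) acc (numbersName.getD c "")
      simp only [loopA, if_pos hlt]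
      simp only [hocc, hnum]
      rw [hbranch, step, emitRuns_cons, if_neg hle]
    · have hemit : emitRuns ((c, k) :: rest) n u.length acc = acc := by
        rw [emitRuns_cons, if_pos (by omega)]
      rw [hemit]
      cases fuel with
      | zero => rfl
      | succ f => simp only [loopA, if_neg hlt]

-- ===== VERDICT (by name: the statement is the Claim_ definition above) =====
theorem readnDigits_spec : Claim_equal_readnDigits := by
  intro s n _hDom hPre
  unfold Spec_readnDigits readnDigits readnDigits_alt
  have h := loopA_eq_emit n (rle s.toList) [] [] n.toNat (rle_pos s.toList) (rle_chain s.toList)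
    (by simp [decode_rle]; exact_mod_cast hPre.1)
    (by simp)
  simpa [decode_rle] using h
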